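-- pv_equiv track=rewrite | github.com/gwillaert1983/rldb | app/scraper/listing.py | _is_profile_url
-- ===== SOURCE A (Python) =====
-- def _is_profile_url(href: str) -> bool:
--     """True only for /profiel/[slug]/ links, not /profiel/ or /profiel/?page=N."""
--     path = href.split("?")[0].rstrip("/")
--     parts = [p for p in path.split("/") if p]
--     # Expect ["profiel", "<slug>"] — exactly two parts ending in profiel/slug
--     return (
--         len(parts) >= 2
--         and parts[-2] == "profiel"
--         and parts[-1] != "profiel"
--     )
-- ===== SOURCE B (Python) =====
-- def _is_profile_url(href: str) -> bool:
--     """Single pass over the characters: track the last two non-empty path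
--     segments; stop at the first '?'."""
--     p2 = p1 = cur = ""
--     for ch in href:
--         if ch == "?":
--             break
--         if ch == "/":
--             if cur:
--                 p2, p1, cur = p1, cur, ""
--         else:
--             cur += ch
--     if cur:
--         p2, p1 = p1, cur
--     return p2 == "profiel" and p1 != "profiel"
-- ===== Notes on version B (the rewrite author's own statement) =====
-- stated objective: alternative
-- what changed: A splits the query-stripped, slash-stripped path into a list of segments and indexes the last two; B makes a single pass over the characters (stopping at '?'), keeping only the last two non-empty segments in two accumulators, so no split, strip or list is built.
import Mathlib
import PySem

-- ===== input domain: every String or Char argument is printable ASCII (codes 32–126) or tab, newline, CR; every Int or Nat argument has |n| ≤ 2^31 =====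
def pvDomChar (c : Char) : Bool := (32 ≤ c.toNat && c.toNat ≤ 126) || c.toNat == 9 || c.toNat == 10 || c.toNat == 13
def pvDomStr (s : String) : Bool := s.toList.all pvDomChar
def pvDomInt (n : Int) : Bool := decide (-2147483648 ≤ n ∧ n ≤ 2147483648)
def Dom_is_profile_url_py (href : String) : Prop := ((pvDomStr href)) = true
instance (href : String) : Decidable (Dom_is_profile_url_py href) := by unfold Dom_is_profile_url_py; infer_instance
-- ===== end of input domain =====

-- B replaces split-filter-index with a single pass over the characters that tracks the
-- last two non-empty path segments (objective: alternative single-pass algorithm).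

def profielCs : List Char := ['p', 'r', 'o', 'f', 'i', 'e', 'l']

-- ===== PORT A =====
-- hand port of str.rstrip("/") (PySem has no right-only strip-with-chars); exact: drops trailing '/' only
def rstripSlash (cs : List Char) : List Char := (cs.reverse.dropWhile (· == '/')).reverse

def is_profile_url_py (href : String) : Bool :=
  -- path = href.split("?")[0].rstrip("/")   (split never returns an empty list, so [0] is total; .getD [] is unreachable)
  let path := rstripSlash ((PySem.List.pyGet? (PySem.Chars.splitOn href.toList ['?']) 0).getD [])
  -- parts = [p for p in path.split("/") if p]
  let parts := (PySem.Chars.splitOn path ['/']).filter (fun p => !p.isEmpty)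
  decide (2 ≤ parts.length) && (PySem.List.pyGet? parts (-2) == some profielCs)
    && !(PySem.List.pyGet? parts (-1) == some profielCs)

-- ===== PORT B =====
def altLoop : List Char → List Char × List Char × List Char → List Char × List Char × List Char
  | [], st => st
  | c :: rest, (p2, p1, cur) =>
    if c = '?' then (p2, p1, cur)                      -- break
    else if c = '/' then
      (if !cur.isEmpty then altLoop rest (p1, cur, []) else altLoop rest (p2, p1, cur))
    else altLoop rest (p2, p1, cur ++ [c])

def is_profile_url_py_alt (href : String) : Bool :=
  let st := altLoop href.toList ([], [], [])
  let fin := if !st.2.2.isEmpty then (st.2.1, st.2.2) else (st.1, st.2.1)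
  fin.1 == profielCs && !(fin.2 == profielCs)

-- ===== PRECONDITION & SPEC =====
def Spec_is_profile_url_py (href : String) (out : Bool) : Prop := out = is_profile_url_py_alt href
instance (href : String) (out : Bool) : Decidable (Spec_is_profile_url_py href out) := by unfold Spec_is_profile_url_py; infer_instance

-- ===== CLAIM (what is proved, stated in full; the proofs are below) =====
def Claim_equal_is_profile_url_py : Prop := ∀ (href : String), Dom_is_profile_url_py href → Spec_is_profile_url_py href (is_profile_url_py href)

-- ===== LEMMAS AND PROOFS =====

-- reference: Python's  s.split(sep)  for a one-character sep, with the (reversed) current piece as accumulator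
def mySplit (s : Char) (a : List Char) : List Char → List (List Char)
  | [] => [a.reverse]
  | c :: cs => if c = s then a.reverse :: mySplit s [] cs else mySplit s (c :: a) cs

-- reference: the non-empty '/'-separated segments, with the (reversed) current piece as accumulator
def segsR (a : List Char) : List Char → List (List Char)
  | [] => if a.isEmpty then [] else [a.reverse]
  | c :: cs =>
    if c = '/' then (if a.isEmpty then segsR [] cs else a.reverse :: segsR [] cs)
    else segsR (c :: a) cs

-- last two elements of a list of segments, with a default pair for the missing ones
def last2 (st : List Char × List Char) (l : List (List Char)) : List Char × List Char :=
  match l.reverse with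
  | a :: b :: _ => (b, a)
  | [a] => (st.2, a)
  | [] => st

def chk (pr : List Char × List Char) : Bool := pr.1 == profielCs && !(pr.2 == profielCs)

theorem go_eq_mySplit (s : Char) :
    ∀ (l : List Char) (fuel : Nat) (a : List Char) (acc : List (List Char)),
      l.length < fuel →
      PySem.Chars.splitOn.go [s] fuel l a acc = acc.reverse ++ mySplit s a l := by
  intro l
  induction l with
  | nil =>
    intro fuel a acc h
    cases fuel with
    | zero => omega
    | succ n => simp [PySem.Chars.splitOn.go, mySplit]
  | cons c rest ih =>
    intro fuel a acc h
    cases fuel with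
    | zero => simp at h
    | succ n =>
      rw [PySem.Chars.splitOn.go]
      by_cases hc : c = s
      · subst hc
        have hp : List.isPrefixOf [c] (c :: rest) = true := by simp [List.isPrefixOf]
        simp only [hp, if_pos, List.length_cons, List.length_nil, List.drop_succ_cons, List.drop_zero]
        rw [ih n [] (a.reverse :: acc) (by simpa using h)]
        simp [mySplit]
      · have hp : List.isPrefixOf [s] (c :: rest) = false := by
          simp [List.isPrefixOf]
          intro hh; exact absurd hh.symm hc
        rw [if_neg (by simp [hp])]
        rw [ih n (c :: a) acc (by simpa using h)]
        simp [mySplit, hc]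

theorem splitOn_eq_mySplit (s : Char) (l : List Char) :
    PySem.Chars.splitOn l [s] = mySplit s [] l := by
  have := go_eq_mySplit s l (l.length + 1) [] [] (by omega)
  simpa [PySem.Chars.splitOn] using this

theorem pyGet?_cons_zero {α : Type} (x : α) (t : List α) :
    PySem.List.pyGet? (x :: t) 0 = some x := by
  simp [PySem.List.pyGet?, PySem.List.pyIdx?]

theorem mySplit_head (s : Char) :
    ∀ (l a : List Char), ∃ t, mySplit s a l = (a.reverse ++ l.takeWhile (· != s)) :: t := by
  intro l
  induction l with
  | nil => intro a; exact ⟨[], by simp [mySplit]⟩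
  | cons c rest ih =>
    intro a
    by_cases hc : c = s
    · subst hc
      exact ⟨mySplit c [] rest, by simp [mySplit, List.takeWhile]⟩
    · obtain ⟨t, ht⟩ := ih (c :: a)
      refine ⟨t, ?_⟩
      have hcs : (c != s) = true := by simp [hc]
      simp only [mySplit, if_neg hc, ht, List.takeWhile, hcs, List.reverse_cons,
        List.append_assoc, List.singleton_append]

theorem filter_mySplit_eq_segsR :
    ∀ (cs a : List Char),
      (mySplit '/' a cs).filter (fun p => !p.isEmpty) = segsR a cs := by
  intro cs
  induction cs with
  | nil =>
    intro a
    by_cases ha : a = [] <;> simp [mySplit, segsR, ha, List.filter]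
  | cons c rest ih =>
    intro a
    by_cases hc : c = '/'
    · subst hc
      by_cases ha : a = [] <;>
        simp [mySplit, segsR, ha, ih]
    · simp [mySplit, segsR, hc, ih]

theorem segsR_all_slash :
    ∀ (ys : List Char), (∀ c ∈ ys, c = '/') → ∀ a, segsR a ys = segsR a [] := by
  intro ys
  induction ys with
  | nil => intro _ a; rfl
  | cons c rest ih =>
    intro h a
    have hc : c = '/' := h c (by simp)
    subst hc
    have hr := ih (fun c hc => h c (by simp [hc]))
    by_cases ha : a = [] <;> simp [segsR, ha, hr, segsR]

theorem segsR_append_slashes :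
    ∀ (xs : List Char) (a : List Char) (ys : List Char), (∀ c ∈ ys, c = '/') →
      segsR a (xs ++ ys) = segsR a xs := by
  intro xs
  induction xs with
  | nil => intro a ys h; simpa using segsR_all_slash ys h a
  | cons c rest ih =>
    intro a ys h
    by_cases hc : c = '/'
    · subst hc
      by_cases ha : a = [] <;> simp [segsR, ha, ih _ ys h]
    · simp [segsR, hc, ih _ ys h]

theorem segsR_rstrip (cs a : List Char) : segsR a (rstripSlash cs) = segsR a cs := by
  have hdecomp : cs = rstripSlash cs ++ (cs.reverse.takeWhile (· == '/')).reverse := by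
    unfold rstripSlash
    rw [← List.reverse_append, List.takeWhile_append_dropWhile, List.reverse_reverse]
  conv_rhs => rw [hdecomp]
  rw [segsR_append_slashes]
  intro c hc
  rw [List.mem_reverse] at hc
  have := List.mem_takeWhile_imp hc
  simpa using this

theorem last2_cons (p2 p1 x : List Char) (m : List (List Char)) :
    last2 (p2, p1) (x :: m) = last2 (p1, x) m := by
  rcases h : m.reverse with _ | ⟨a, _ | ⟨b, t⟩⟩ <;>
    simp [last2, h, List.reverse_cons]

theorem altLoop_takeWhile :
    ∀ (cs : List Char) (st : List Char × List Char × List Char),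
      altLoop cs st = altLoop (cs.takeWhile (· != '?')) st := by
  intro cs
  induction cs with
  | nil => intro st; rfl
  | cons c rest ih =>
    intro ⟨p2, p1, cur⟩
    by_cases hq : c = '?'
    · subst hq; simp [altLoop, List.takeWhile]
    · have hb : (c != '?') = true := by simp [hq]
      by_cases hs : c = '/'
      · by_cases hcur : cur.isEmpty <;>
          simp [altLoop, List.takeWhile, hs, hcur, ih]
      · simp [altLoop, List.takeWhile, hq, hs, hb, ih]

theorem altLoop_segsR :
    ∀ (cs : List Char) (p2 p1 cur : List Char), (∀ c ∈ cs, c ≠ '?') →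
      (let st := altLoop cs (p2, p1, cur);
       if !st.2.2.isEmpty then (st.2.1, st.2.2) else (st.1, st.2.1)) =
      last2 (p2, p1) (segsR cur.reverse cs) := by
  intro cs
  induction cs with
  | nil =>
    intro p2 p1 cur _
    by_cases hcur : cur = []
    · simp [altLoop, segsR, hcur, last2]
    · have h1 : cur.reverse.isEmpty = false := by simp [hcur]
      simp [altLoop, segsR, h1, hcur, last2]
  | cons c rest ih =>
    intro p2 p1 cur h
    have hq : c ≠ '?' := h c (by simp)
    have hr : ∀ c ∈ rest, c ≠ '?' := fun c hc => h c (by simp [hc])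
    by_cases hs : c = '/'
    · subst hs
      by_cases hcur : cur = []
      · subst hcur
        have hi := ih p2 p1 [] hr
        simp only [List.reverse_nil] at hi
        simpa [altLoop, hq, segsR] using hi
      · have h1 : cur.reverse.isEmpty = false := by simp [hcur]
        have h2 : cur.isEmpty = false := by simp [hcur]
        simp only [altLoop, if_neg hq, h2, Bool.not_false, if_pos]
        rw [ih _ _ _ hr]
        simp [segsR, h1, last2_cons]
    · simp only [altLoop, if_neg hq, if_neg hs]
      rw [ih _ _ _ hr]
      simp [segsR, hs]

theorem checkA_eq_chk (l : List (List Char)) :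
    (decide (2 ≤ l.length) && (PySem.List.pyGet? l (-2) == some profielCs)
      && !(PySem.List.pyGet? l (-1) == some profielCs)) = chk (last2 ([], []) l) := by
  rcases h : l.reverse with _ | ⟨a, _ | ⟨b, t⟩⟩
  · have : l = [] := by simpa using congrArg List.reverse h
    subst this
    simp [last2, chk, profielCs, PySem.List.pyGet?]
  · have : l = [a] := by
      have := congrArg List.reverse h
      simpa using this
    subst this
    simp [last2, h, chk, profielCs, PySem.List.pyGet?]
  · have hl : l = t.reverse ++ [b, a] := by
      have := congrArg List.reverse h
      simpa using this
    subst hl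
    have hlen : (t.reverse ++ [b, a]).length = t.length + 2 := by simp
    simp only [last2, h, chk]
    have hg2 : PySem.List.pyGet? (t.reverse ++ [b, a]) (-2) = some b := by
      simp [PySem.List.pyGet?, PySem.List.pyIdx?]
    have hg1 : PySem.List.pyGet? (t.reverse ++ [b, a]) (-1) = some a := by
      simp [PySem.List.pyGet?, PySem.List.pyIdx?]
    simp [hg2, hg1, hlen]

-- ===== VERDICT (by name: the statement is the Claim_ definition above) =====
theorem is_profile_url_py_spec : Claim_equal_is_profile_url_py := by
  intro href _
  unfold Spec_is_profile_url_py is_profile_url_py is_profile_url_py_alt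
  set cs := href.toList with hcs
  set q := cs.takeWhile (· != '?') with hq
  -- A side: the first piece of the '?'-split is the take-while prefix
  obtain ⟨t, ht⟩ := mySplit_head '?' cs []
  have hA1 : (PySem.List.pyGet? (PySem.Chars.splitOn cs ['?']) 0).getD [] = q := by
    rw [splitOn_eq_mySplit, ht, pyGet?_cons_zero]
    simp [hq]
  simp only []
  rw [hA1, splitOn_eq_mySplit, filter_mySplit_eq_segsR, segsR_rstrip, checkA_eq_chk]
  -- B side
  rw [altLoop_takeWhile cs ([], [], [])]
  have hnq : ∀ c ∈ q, c ≠ '?' := by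
    intro c hc
    have := List.mem_takeWhile_imp hc
    simpa using this
  have hB := altLoop_segsR q [] [] [] hnq
  simp only [List.reverse_nil] at hB
  simp only [← hq] at *
  rw [show (if (!(altLoop q ([], [], [])).2.2.isEmpty) = true
        then ((altLoop q ([], [], [])).2.1, (altLoop q ([], [], [])).2.2)
        else ((altLoop q ([], [], [])).1, (altLoop q ([], [], [])).2.1)) =
      last2 ([], []) (segsR [] q) from hB]
  rfl
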